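-- pv_equiv track=rewrite | github.com/Gaon-Choi/BOJ | 프로그래머스/2/70129. 이진 변환 반복하기/이진 변환 반복하기.py | solution
-- ===== SOURCE A (Python) =====
-- def solution(s):
--     answer = []
--
--     cnt = 0
--     zeros = 0
--
--     while s != '1':
--         size = len(s)
--         zero_cnt = s.count('0')
--
--         s = str(bin(size - zero_cnt))[2:]
--         cnt += 1
--         zeros += zero_cnt
--
--     answer.append(cnt)
--     answer.append(zeros)
--
--
--     return answer
-- ===== SOURCE B (Python) =====
-- def removed(n):
--     # per-step zero-removals along the integer chain n -> popcount(n) -> ... -> 1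
--     if n == 1:
--         return []
--     return [n.bit_length() - n.bit_count()] + removed(n.bit_count())
--
-- def solution(s):
--     if s == '1':
--         return [0, 0]
--     z = s.count('0')
--     steps = [z] + removed(len(s) - z)
--     return [len(steps), sum(steps)]
-- ===== Notes on version B (the rewrite author's own statement) =====
-- stated objective: alternative
-- what changed: B replaces A's while loop with mutated string state and running accumulators by a recursive staged computation: it builds the explicit list of per-step zero-removals over an integer (bit_length/bit_count) chain, then reads the answer off as the list's length and sum.
-- outside the precondition, e.g. on solution('0'): A does not finish within the time limit, B raises RecursionError
import Mathlib
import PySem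

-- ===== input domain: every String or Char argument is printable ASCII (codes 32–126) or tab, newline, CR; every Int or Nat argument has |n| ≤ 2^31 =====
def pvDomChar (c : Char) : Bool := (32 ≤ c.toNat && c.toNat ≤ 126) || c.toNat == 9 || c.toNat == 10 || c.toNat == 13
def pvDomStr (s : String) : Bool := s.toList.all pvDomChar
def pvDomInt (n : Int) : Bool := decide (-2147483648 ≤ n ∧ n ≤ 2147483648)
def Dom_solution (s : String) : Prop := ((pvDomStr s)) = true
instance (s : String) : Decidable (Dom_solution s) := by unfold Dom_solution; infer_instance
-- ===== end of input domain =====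

-- A = count binary-transformation steps and removed zeros; B builds the list of per-step
-- zero-removals recursively over an integer chain and returns [length, sum] of that list,
-- instead of A's while loop mutating a binary string with running accumulators.


-- ===== PORT A =====
-- A's while loop; the fuel argument only makes it total (it is ample on every input Pre_ admits,
-- where the Python loop terminates)
def solutionLoop : Nat → String → Int → Int → List Int
  | 0, _, cnt, zeros => [cnt, zeros]
  | fuel+1, s, cnt, zeros =>
    if s = "1" then [cnt, zeros]
    else
      let size : Int := PySem.Str.len s
      let zeroCnt : Int := (PySem.Str.count s "0" : Int)
      -- s = str(bin(size - zero_cnt))[2:]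
      solutionLoop fuel (PySem.Str.slice (PySem.Int.pyBin (size - zeroCnt)) (some 2) none)
        (cnt + 1) (zeros + zeroCnt)

def solution (s : String) : List Int :=
  solutionLoop (s.toList.length + 64) s 0 0

-- ===== PORT B =====
-- B's recursive helper removed(n); fuel only makes the (terminating) Python recursion total
def removedList : Nat → Int → List Int
  | 0, _ => []
  | fuel+1, n =>
    if n = 1 then []
    else ((PySem.Int.bitLength n : Int) - (PySem.Int.bitCount n : Int))
           :: removedList fuel ((PySem.Int.bitCount n : Int))

def solution_alt (s : String) : List Int :=
  if s = "1" then [0, 0]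
  else
    let z : Int := (PySem.Str.count s "0" : Int)
    let steps : List Int := z :: removedList (s.toList.length + 63) (PySem.Str.len s - z)
    [(steps.length : Int), steps.sum]

-- ===== PRECONDITION & SPEC =====
-- Pre_ excludes exactly the inputs on which A's while loop never terminates (A returns nothing there):
-- strings all of whose characters are '0' (including ""), where bin(0)[2:] = '0' loops forever.
def Pre_solution (s : String) : Prop := (PySem.Str.count s "0" : Int) < PySem.Str.len s
instance (s : String) : Decidable (Pre_solution s) := by unfold Pre_solution; infer_instance
def pvWitness_solution : String := "110010"

def Spec_solution (s : String) (out : List Int) : Prop := out = solution_alt s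
instance (s : String) (out : List Int) : Decidable (Spec_solution s out) := by unfold Spec_solution; infer_instance

-- ===== CLAIM (what is proved, stated in full; the proofs are below) =====
def Claim_equal_solution : Prop := ∀ (s : String), Dom_solution s → Pre_solution s → Spec_solution s (solution s)

-- ===== LEMMAS AND PROOFS =====

-- binary digits of m, most significant first: the shape of Nat.toDigits 2 m convenient for induction
def binRep (m : Nat) : List Char :=
  if h : m / 2 = 0 then [Nat.digitChar (m % 2)]
  else binRep (m / 2) ++ [Nat.digitChar (m % 2)]
decreasing_by exact Nat.div_lt_self (by omega) (by omega)

lemma toDigitsCore_eq_binRep : ∀ (f m : Nat) (acc : List Char), m < f →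
    Nat.toDigitsCore 2 f m acc = binRep m ++ acc := by
  intro f
  induction f with
  | zero => omega
  | succ f ih =>
    intro m acc h
    rw [Nat.toDigitsCore, binRep]
    by_cases h2 : m / 2 = 0
    · simp [h2]
    · have : m / 2 < f := by omega
      simp [h2, ih (m/2) _ this]

lemma toDigits_eq_binRep (m : Nat) : Nat.toDigits 2 m = binRep m := by
  rw [Nat.toDigits, toDigitsCore_eq_binRep (m+1) m [] (by omega), List.append_nil]

lemma binRep_ne_nil (m : Nat) : binRep m ≠ [] := by
  rw [binRep]; split <;> simp

lemma length_binRep (m : Nat) (h : 1 ≤ m) : (binRep m).length = PySem.Int.bitLength (m : Int) := by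
  induction m using Nat.strong_induction_on with
  | _ m ih =>
    rw [binRep, PySem.Int.bitLength_natCast (by omega)]
    by_cases h2 : m / 2 = 0
    · simp [h2]
    · rw [dif_neg h2]
      simp [ih (m/2) (Nat.div_lt_self (by omega) (by omega)) (by omega)]

lemma count0_binRep (m : Nat) (h : 1 ≤ m) :
    (binRep m).count '0' + PySem.Int.bitCount (m : Int) = PySem.Int.bitLength (m : Int) := by
  induction m using Nat.strong_induction_on with
  | _ m ih =>
    rw [binRep, PySem.Int.bitLength_natCast (by omega), PySem.Int.bitCount_natCast (by omega)]
    by_cases h2 : m / 2 = 0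
    · have hm : m = 1 := by omega
      subst hm; decide
    · rw [dif_neg h2]
      have ihm := ih (m/2) (Nat.div_lt_self (by omega) (by omega)) (by omega)
      rw [List.count_append]
      have : (List.count '0' [Nat.digitChar (m % 2)] : Nat) + m % 2 = 1 := by
        have : m % 2 = 0 ∨ m % 2 = 1 := by omega
        rcases this with h3 | h3 <;> rw [h3] <;> decide
      omega

lemma binRep_eq_one_iff (m : Nat) : binRep m = ['1'] ↔ m = 1 := by
  constructor
  · intro h
    rw [binRep] at h
    by_cases h2 : m / 2 = 0
    · rw [dif_pos h2] at h
      simp at h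
      have : m % 2 = 0 ∨ m % 2 = 1 := by omega
      rcases this with h3 | h3
      · rw [h3] at h; exact absurd h (by decide)
      · omega
    · rw [dif_neg h2] at h
      have := binRep_ne_nil (m/2)
      rcases List.exists_cons_of_ne_nil this with ⟨a, t, ht⟩
      rw [ht] at h
      simp at h
  · intro h; subst h; rw [binRep]; decide

lemma bitCount_pos (m : Nat) (h : 1 ≤ m) : 1 ≤ PySem.Int.bitCount (m : Int) := by
  induction m using Nat.strong_induction_on with
  | _ m ih =>
    rw [PySem.Int.bitCount_natCast (by omega)]
    by_cases h2 : m / 2 = 0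
    · have : m = 1 := by omega
      subst this; decide
    · have := ih (m/2) (Nat.div_lt_self (by omega) (by omega)) (by omega)
      omega

lemma count_go_single (c : Char) : ∀ (l : List Char) (fuel : Nat) (acc : Nat), l.length ≤ fuel →
    PySem.Chars.count.go [c] fuel l acc = acc + l.count c := by
  intro l
  induction l with
  | nil => intro fuel acc h; cases fuel <;> simp [PySem.Chars.count.go]
  | cons x t ih =>
    intro fuel acc h
    cases fuel with
    | zero => simp at h
    | succ f =>
      rw [PySem.Chars.count.go]
      have hlen : t.length ≤ f := by simpa using h
      by_cases hc : c = x
      · have hp : ([c].isPrefixOf (x :: t)) = true := by simp [List.isPrefixOf, hc]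
        rw [if_pos hp]
        simp only [List.length_singleton, List.drop_succ_cons, List.drop_zero]
        rw [ih f (acc+1) hlen, List.count_cons]
        simp [hc]
        omega
      · have hp : ([c].isPrefixOf (x :: t)) = false := by
          simp [List.isPrefixOf]
          exact hc
        rw [if_neg (by simp [hp])]
        rw [ih f acc hlen, List.count_cons]
        have : (x == c) = false := by simpa using fun h' => hc h'.symm
        simp [this]

lemma count_single (s : List Char) (c : Char) : PySem.Chars.count s [c] = s.count c := by
  rw [PySem.Chars.count]
  simp [count_go_single c s s.length 0 (le_refl _)]

-- the string A carries after a step whose ones-count is m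
lemma toList_sB (m : Nat) : (PySem.Str.slice (PySem.Int.pyBin (m : Int)) (some 2) none).toList
    = binRep m := by
  rw [PySem.Str.slice, String.toList_ofList, PySem.Chars.slice, PySem.List.slice_some_none,
    PySem.Int.toList_pyBin, PySem.Int.toBinChars0b]
  rw [if_neg (by omega)]
  rw [show (2 : Int) = ((2 : Nat) : Int) from rfl, PySem.List.clampIdx_natCast]
  have hb : Nat.toDigits 2 ((m : Int)).toNat = binRep ((m : Int)).toNat := toDigits_eq_binRep _
  have hnn : binRep ((m : Int)).toNat ≠ [] := by rw [binRep]; split <;> simp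
  have h3 : (3:Nat) ≤ ('0' :: 'b' :: Nat.toDigits 2 ((m : Int)).toNat).length := by
    rw [hb]
    cases h : binRep ((m : Int)).toNat with
    | nil => exact absurd h hnn
    | cons a t => simp
  rw [min_eq_left (by omega)]
  simp
  exact toDigits_eq_binRep m

-- A's loop from the binary string of m equals [cnt + #steps, zeros + Σ removals] of B's list
lemma loop_eq : ∀ (f : Nat) (m : Nat) (cnt zeros : Int), 1 ≤ m →
    solutionLoop f (PySem.Str.slice (PySem.Int.pyBin (m : Int)) (some 2) none) cnt zeros
      = [cnt + ((removedList f (m : Int)).length : Int), zeros + (removedList f (m : Int)).sum] := by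
  intro f
  induction f with
  | zero => intro m cnt zeros hm; simp [solutionLoop, removedList]
  | succ f ih =>
    intro m cnt zeros hm
    by_cases h1 : m = 1
    · subst h1
      have hs : PySem.Str.slice (PySem.Int.pyBin ((1:Nat) : Int)) (some 2) none = "1" := by decide
      rw [solutionLoop, removedList, if_pos hs, if_pos (by norm_num)]
      simp
    · have hm2 : 2 ≤ m := by omega
      have hsne : PySem.Str.slice (PySem.Int.pyBin (m : Int)) (some 2) none ≠ "1" := by
        intro he
        have ht := congrArg String.toList he
        rw [toList_sB] at ht
        exact h1 ((binRep_eq_one_iff m).mp ht)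
      have hlen : PySem.Str.len (PySem.Str.slice (PySem.Int.pyBin (m : Int)) (some 2) none)
          = (PySem.Int.bitLength (m : Int) : Int) := by
        rw [PySem.Str.len_eq, toList_sB, length_binRep m (by omega)]
      have hzc : ((PySem.Str.count (PySem.Str.slice (PySem.Int.pyBin (m : Int)) (some 2) none) "0" : Nat) : Int)
          = (PySem.Int.bitLength (m : Int) : Int) - (PySem.Int.bitCount (m : Int) : Int) := by
        rw [PySem.Str.count_eq, toList_sB]
        rw [show ("0" : String).toList = ['0'] from rfl, count_single]
        have := count0_binRep m (by omega)
        omega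
      rw [solutionLoop, removedList, if_neg hsne,
        if_neg (by exact_mod_cast (by omega : (m : Int) ≠ 1))]
      simp only [hlen, hzc]
      have harg : (PySem.Int.bitLength (m : Int) : Int)
          - ((PySem.Int.bitLength (m : Int) : Int) - (PySem.Int.bitCount (m : Int) : Int))
          = ((PySem.Int.bitCount (m : Int) : Nat) : Int) := by ring
      rw [harg, ih (PySem.Int.bitCount (m : Int)) (cnt + 1) _ (bitCount_pos m (by omega))]
      simp only [List.length_cons, List.sum_cons]
      push_cast
      ring_nf

lemma count_le_len (s : String) : PySem.Str.count s "0" ≤ s.toList.length := by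
  rw [PySem.Str.count_eq, show ("0" : String).toList = ['0'] from rfl, count_single]
  exact List.count_le_length

-- ===== VERDICT (by name: the statement is the Claim_ definition above) =====
theorem solution_spec : Claim_equal_solution := by
  intro s _ hpre
  unfold Spec_solution solution solution_alt
  by_cases h1 : s = "1"
  · subst h1
    rw [if_pos rfl]
    rfl
  · rw [if_neg h1]
    have hc : PySem.Str.count s "0" ≤ s.toList.length := count_le_len s
    have hpre' : PySem.Str.count s "0" < s.toList.length := by
      unfold Pre_solution at hpre
      rw [PySem.Str.len_eq] at hpre
      exact_mod_cast hpre
    rw [show s.toList.length + 64 = (s.toList.length + 63) + 1 from rfl,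
      solutionLoop, if_neg h1]
    simp only [zero_add]
    have hmc : PySem.Str.len s - (PySem.Str.count s "0" : Int)
        = ((s.toList.length - PySem.Str.count s "0" : Nat) : Int) := by
      rw [PySem.Str.len_eq]
      omega
    rw [hmc]
    rw [loop_eq (s.toList.length + 63) _ 1 _ (by omega)]
    rw [← hmc]
    simp only [List.length_cons, List.sum_cons]
    push_cast
    ring_nf
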